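-- pv_equiv track=rewrite | github.com/FrederikTheisen/trDesignFFT | src/utils.py | seqfrommotifs
-- ===== SOURCE A (Python) =====
-- def seqfrommotifs(motifs,sequence, bkgseq):
--     newseq = ""
--     for pos in range(len(bkgseq)):
--         use_bkg = True
--         for m in motifs[:]:
--             if pos >= m[5] and pos <= m[6]:
--                 mpos = pos - m[5]
--                 if m[3][mpos] == 'b' or m[3][mpos] == 's':
--                     templatepos = m[0] + mpos
--                     use_bkg = False
--                     newseq += sequence[templatepos]
--                 break
--
--         if use_bkg == True: newseq += bkgseq[pos]
--
--     return newseq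
-- ===== SOURCE B (Python) =====
-- def seqfrommotifs(motifs, sequence, bkgseq):
--     # Paint a position -> first-covering-motif table once (iterate motifs in
--     # reverse so earlier motifs overwrite later ones), then emit one char per
--     # position: O(n + total clamped motif span) instead of O(n * m).
--     n = len(bkgseq)
--     cover = [None] * n
--     for m in reversed(motifs):
--         lo = m[5] if m[5] > 0 else 0
--         hi = m[6] if m[6] < n - 1 else n - 1
--         for p in range(lo, hi + 1):
--             cover[p] = m
--     out = []
--     for pos in range(n):
--         m = cover[pos]
--         if m is None:
--             out.append(bkgseq[pos])
--         else:
--             mpos = pos - m[5]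
--             c = m[3][mpos]
--             if c == 'b' or c == 's':
--                 out.append(sequence[m[0] + mpos])
--             else:
--                 out.append(bkgseq[pos])
--     return ''.join(out)
-- ===== Notes on version B (the rewrite author's own statement) =====
-- stated objective: faster
-- what changed: Instead of scanning the motif list from the front at every position, B paints a position-to-first-covering-motif table once (iterating motifs in reverse so earlier motifs overwrite later ones) and then emits one character per position by table lookup.
import Mathlib
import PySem

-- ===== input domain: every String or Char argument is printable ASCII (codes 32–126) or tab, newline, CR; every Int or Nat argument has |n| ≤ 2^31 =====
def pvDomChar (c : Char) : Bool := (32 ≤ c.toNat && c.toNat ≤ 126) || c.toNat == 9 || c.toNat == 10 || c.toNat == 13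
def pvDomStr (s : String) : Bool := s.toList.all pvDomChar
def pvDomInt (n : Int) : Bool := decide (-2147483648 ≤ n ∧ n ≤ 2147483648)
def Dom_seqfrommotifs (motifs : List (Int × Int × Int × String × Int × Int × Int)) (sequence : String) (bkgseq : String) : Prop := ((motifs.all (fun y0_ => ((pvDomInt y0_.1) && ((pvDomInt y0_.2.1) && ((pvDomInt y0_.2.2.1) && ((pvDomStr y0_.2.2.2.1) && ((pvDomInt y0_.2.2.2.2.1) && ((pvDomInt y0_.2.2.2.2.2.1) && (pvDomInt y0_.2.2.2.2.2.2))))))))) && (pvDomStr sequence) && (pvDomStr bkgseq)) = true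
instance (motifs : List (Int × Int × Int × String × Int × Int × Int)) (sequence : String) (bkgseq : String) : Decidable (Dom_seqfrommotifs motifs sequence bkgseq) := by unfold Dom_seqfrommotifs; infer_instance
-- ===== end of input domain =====

-- B replaces A's per-position scan of the motif list by a painted position→first-covering-motif
-- table, dropping the cost from O(n·m) to O(n + total clamped motif span).

-- ===== PORT A =====
-- inner 'for m in motifs[:]' loop of A: returns the character(s) appended at position pos
-- ('!' defaults are unreachable under Pre_, which excludes A's IndexError inputs)
def seqA_inner (sequence bkgseq : String) (pos : Int) :
    List (Int × Int × Int × String × Int × Int × Int) → List Char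
  | [] => [(PySem.Str.pyGet? bkgseq pos).getD '!']
  | m :: rest =>
      if m.2.2.2.2.2.1 ≤ pos ∧ pos ≤ m.2.2.2.2.2.2 then
        let mpos := pos - m.2.2.2.2.2.1
        if (PySem.Str.pyGet? m.2.2.2.1 mpos).getD '!' = 'b' ∨
           (PySem.Str.pyGet? m.2.2.2.1 mpos).getD '!' = 's' then
          [(PySem.Str.pyGet? sequence (m.1 + mpos)).getD '!']
        else
          [(PySem.Str.pyGet? bkgseq pos).getD '!']
      else seqA_inner sequence bkgseq pos rest

def seqfrommotifs (motifs : List (Int × Int × Int × String × Int × Int × Int)) (sequence : String) (bkgseq : String) : String :=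
  String.ofList
    ((PySem.List.pyRange 0 bkgseq.toList.length 1).foldl
      (fun newseq pos => newseq ++ seqA_inner sequence bkgseq pos motifs) [])

-- ===== PORT B =====
-- paint the interval [max(m5,0), min(m6,n-1)] of the cover table with motif m
def seqB_paint (n : Nat) (cover : List (Option (Int × Int × Int × String × Int × Int × Int)))
    (m : Int × Int × Int × String × Int × Int × Int) :
    List (Option (Int × Int × Int × String × Int × Int × Int)) :=
  let lo := if m.2.2.2.2.2.1 > 0 then m.2.2.2.2.2.1 else 0
  let hi := if m.2.2.2.2.2.2 < (n : Int) - 1 then m.2.2.2.2.2.2 else (n : Int) - 1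
  (PySem.List.pyRange lo (hi + 1) 1).foldl (fun a p => PySem.List.pySetD a p (some m)) cover

def seqfrommotifs_alt (motifs : List (Int × Int × Int × String × Int × Int × Int)) (sequence : String) (bkgseq : String) : String :=
  let n := bkgseq.toList.length
  let cover := motifs.reverse.foldl (seqB_paint n) (List.replicate n none)
  String.ofList
    ((PySem.List.pyRange 0 n 1).foldl
      (fun out pos =>
        match PySem.List.pyGetD cover pos none with
        | none => out ++ [(PySem.Str.pyGet? bkgseq pos).getD '!']
        | some m =>
            let mpos := pos - m.2.2.2.2.2.1
            if (PySem.Str.pyGet? m.2.2.2.1 mpos).getD '!' = 'b' ∨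
               (PySem.Str.pyGet? m.2.2.2.1 mpos).getD '!' = 's' then
              out ++ [(PySem.Str.pyGet? sequence (m.1 + mpos)).getD '!']
            else out ++ [(PySem.Str.pyGet? bkgseq pos).getD '!'])
      [])

-- ===== PRECONDITION & SPEC =====
-- does motif m cover position pos? (pos >= m[5] and pos <= m[6])
def pvCovers (pos : Int) (m : Int × Int × Int × String × Int × Int × Int) : Bool :=
  decide (m.2.2.2.2.2.1 ≤ pos ∧ pos ≤ m.2.2.2.2.2.2)

-- the in-range requirements A's indexing puts on the first motif covering pos
def pvPreAt (sequence : String) (pos : Int) (m : Int × Int × Int × String × Int × Int × Int) : Bool :=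
  match PySem.Str.pyGet? m.2.2.2.1 (pos - m.2.2.2.2.2.1) with
  | none => false
  | some c =>
      if c = 'b' || c = 's' then
        decide (PySem.Raise.InRange sequence.toList.length (m.1 + (pos - m.2.2.2.2.2.1)))
      else true

-- Pre_ excludes exactly the inputs on which A raises IndexError: at some position the first
-- covering motif's mask index m[3][pos-m[5]] or template index sequence[m[0]+pos-m[5]] is out of range.
def Pre_seqfrommotifs (motifs : List (Int × Int × Int × String × Int × Int × Int)) (sequence : String) (bkgseq : String) : Prop :=
  ∀ k ∈ List.range bkgseq.toList.length,
    ((motifs.find? (pvCovers (k : Int))).all (pvPreAt sequence (k : Int))) = true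
instance (motifs : List (Int × Int × Int × String × Int × Int × Int)) (sequence : String) (bkgseq : String) : Decidable (Pre_seqfrommotifs motifs sequence bkgseq) := by unfold Pre_seqfrommotifs; infer_instance

def pvWitness_seqfrommotifs : (List (Int × Int × Int × String × Int × Int × Int)) × String × String :=
  ([(0, 0, 0, "bxb", 0, 1, 3)], "XYZ", "aaaaa")

def Spec_seqfrommotifs (motifs : List (Int × Int × Int × String × Int × Int × Int)) (sequence : String) (bkgseq : String) (out : String) : Prop := out = seqfrommotifs_alt motifs sequence bkgseq
instance (motifs : List (Int × Int × Int × String × Int × Int × Int)) (sequence : String) (bkgseq : String) (out : String) : Decidable (Spec_seqfrommotifs motifs sequence bkgseq out) := by unfold Spec_seqfrommotifs; infer_instance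

-- ===== CLAIM (what is proved, stated in full; the proofs are below) =====
def Claim_equal_seqfrommotifs : Prop := ∀ (motifs : List (Int × Int × Int × String × Int × Int × Int)) (sequence : String) (bkgseq : String), Dom_seqfrommotifs motifs sequence bkgseq → Pre_seqfrommotifs motifs sequence bkgseq → Spec_seqfrommotifs motifs sequence bkgseq (seqfrommotifs motifs sequence bkgseq)


-- ===== LEMMAS AND PROOFS =====

-- painting a [lo,hi] interval of set-commands: pointwise effect on the table
theorem pvPaintRangeGetD {M : Type} (m : M) :
    ∀ (fuel : Nat) (lo hi : Int) (arr : List (Option M)) (k : Nat),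
      (hi + 1 - lo).toNat ≤ fuel → 0 ≤ lo → hi < (arr.length : Int) → k < arr.length →
      PySem.List.pyGetD
        ((PySem.List.pyRange lo (hi + 1) 1).foldl (fun a p => PySem.List.pySetD a p (some m)) arr)
        (k : Int) none
      = if lo ≤ (k : Int) ∧ (k : Int) ≤ hi then some m else PySem.List.pyGetD arr (k : Int) none := by
  intro fuel
  induction fuel with
  | zero =>
      intro lo hi arr k hfuel hlo hhi hk
      rw [PySem.List.pyRange_one_eq_nil (by omega)]
      have : ¬ (lo ≤ (k : Int) ∧ (k : Int) ≤ hi) := by omega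
      simp [this]
  | succ fuel ih =>
      intro lo hi arr k hfuel hlo hhi hk
      by_cases h : lo < hi + 1
      · rw [PySem.List.pyRange_one_cons h]
        simp only [List.foldl_cons]
        rw [ih (lo + 1) hi (PySem.List.pySetD arr lo (some m)) k
              (by omega) (by omega)
              (by rw [PySem.List.length_pySetD]; exact hhi)
              (by rw [PySem.List.length_pySetD]; exact hk)]
        have hcast : lo = ((lo.toNat : Nat) : Int) := (Int.toNat_of_nonneg hlo).symm
        rw [hcast, PySem.List.pyGetD_pySetD_natCast arr lo.toNat k (some m) none (by omega)]
        split_ifs with h1 h2 h3 h2 h3 <;> first | rfl | omega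
      · rw [PySem.List.pyRange_one_eq_nil (by omega)]
        have : ¬ (lo ≤ (k : Int) ∧ (k : Int) ≤ hi) := by omega
        simp [this]

theorem pvLengthFoldlSet {M : Type} (v : Option M) :
    ∀ (ps : List Int) (a : List (Option M)),
      (ps.foldl (fun a p => PySem.List.pySetD a p v) a).length = a.length := by
  intro ps
  induction ps with
  | nil => intro a; rfl
  | cons p ps ih => intro a; simp only [List.foldl_cons]; rw [ih, PySem.List.length_pySetD]

theorem pvLengthPaint (n : Nat) (arr : List (Option (Int × Int × Int × String × Int × Int × Int)))
    (m : Int × Int × Int × String × Int × Int × Int) :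
    (seqB_paint n arr m).length = arr.length := by
  unfold seqB_paint
  exact pvLengthFoldlSet _ _ _

theorem pvPaintGetD (n : Nat) (arr : List (Option (Int × Int × Int × String × Int × Int × Int)))
    (harr : arr.length = n) (m : Int × Int × Int × String × Int × Int × Int) (k : Nat) (hk : k < n) :
    PySem.List.pyGetD (seqB_paint n arr m) (k : Int) none
      = if pvCovers (k : Int) m then some m else PySem.List.pyGetD arr (k : Int) none := by
  unfold seqB_paint
  rw [pvPaintRangeGetD m ((((if m.2.2.2.2.2.2 < (n : Int) - 1 then m.2.2.2.2.2.2 else (n : Int) - 1)) + 1 -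
        (if m.2.2.2.2.2.1 > 0 then m.2.2.2.2.2.1 else 0)).toNat) _ _ arr k le_rfl
        (by split_ifs <;> omega) (by rw [harr]; split_ifs <;> omega) (by omega)]
  by_cases hc : m.2.2.2.2.2.1 ≤ (k : Int) ∧ (k : Int) ≤ m.2.2.2.2.2.2
  · have hiff : (if m.2.2.2.2.2.1 > 0 then m.2.2.2.2.2.1 else 0) ≤ (k : Int) ∧
        (k : Int) ≤ (if m.2.2.2.2.2.2 < (n : Int) - 1 then m.2.2.2.2.2.2 else (n : Int) - 1) := by
      split_ifs <;> omega
    simp [pvCovers, hc, hiff]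
  · have hiff : ¬ ((if m.2.2.2.2.2.1 > 0 then m.2.2.2.2.2.1 else 0) ≤ (k : Int) ∧
        (k : Int) ≤ (if m.2.2.2.2.2.2 < (n : Int) - 1 then m.2.2.2.2.2.2 else (n : Int) - 1)) := by
      split_ifs <;> omega
    simp [pvCovers, hc, hiff]

-- the painted table holds, at each position, the FIRST motif of the list covering it
theorem pvCoverGetD (motifs : List (Int × Int × Int × String × Int × Int × Int)) (n : Nat)
    (k : Nat) (hk : k < n) :
    PySem.List.pyGetD (motifs.reverse.foldl (seqB_paint n) (List.replicate n none)) (k : Int) none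
      = motifs.find? (pvCovers (k : Int)) := by
  rw [List.foldl_reverse]
  induction motifs with
  | nil =>
      simp only [List.foldr_nil, List.find?_nil]
      rw [PySem.List.pyGetD_of_nonneg (List.replicate n (none : Option (Int × Int × Int × String × Int × Int × Int))) (none) (by omega)]
      simp [List.getD]
  | cons m rest ih =>
      have hlen : (rest.foldr (fun m a => seqB_paint n a m) (List.replicate n none)).length = n := by
        clear ih
        induction rest with
        | nil => simp
        | cons r rs ih2 => simp only [List.foldr_cons]; rw [pvLengthPaint, ih2]
      simp only [List.foldr_cons, List.find?_cons]
      rw [pvPaintGetD n _ hlen m k hk, ih]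
      rcases pvCovers (k : Int) m
      · simp
      · simp

-- A's inner loop returns the character chosen by the first covering motif
theorem pvInnerEq (sequence bkgseq : String) (pos : Int)
    (ms : List (Int × Int × Int × String × Int × Int × Int)) :
    seqA_inner sequence bkgseq pos ms =
      match ms.find? (pvCovers pos) with
      | none => [(PySem.Str.pyGet? bkgseq pos).getD '!']
      | some m =>
          if (PySem.Str.pyGet? m.2.2.2.1 (pos - m.2.2.2.2.2.1)).getD '!' = 'b' ∨
             (PySem.Str.pyGet? m.2.2.2.1 (pos - m.2.2.2.2.2.1)).getD '!' = 's' then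
            [(PySem.Str.pyGet? sequence (m.1 + (pos - m.2.2.2.2.2.1))).getD '!']
          else [(PySem.Str.pyGet? bkgseq pos).getD '!'] := by
  induction ms with
  | nil => simp [seqA_inner]
  | cons m rest ih =>
      by_cases h : m.2.2.2.2.2.1 ≤ pos ∧ pos ≤ m.2.2.2.2.2.2
      · simp [seqA_inner, pvCovers, h]
      · simp [seqA_inner, pvCovers, h, ih]

-- ===== VERDICT (by name: the statement is the Claim_ definition above) =====
theorem seqfrommotifs_spec : Claim_equal_seqfrommotifs := by
  intro motifs sequence bkgseq _ _
  unfold Spec_seqfrommotifs seqfrommotifs seqfrommotifs_alt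
  congr 1
  apply PySem.List.foldl_congr_mem
  intro acc pos hpos
  rw [PySem.List.mem_pyRange_one] at hpos
  have hk : pos = ((pos.toNat : Nat) : Int) := (Int.toNat_of_nonneg hpos.1).symm
  have hkn : pos.toNat < bkgseq.toList.length := by omega
  rw [pvInnerEq]
  rw [hk, pvCoverGetD motifs bkgseq.toList.length pos.toNat hkn]
  cases List.find? (pvCovers ((pos.toNat : Nat) : Int)) motifs with
  | none => rfl
  | some m => dsimp only; split_ifs <;> rfl
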